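-- pv_equiv track=rewrite | github.com/AEndrix03/context-packet-manager | cpm_builtin/chunking/java.py | _classify_java_symbol
-- ===== SOURCE A (Python) =====
-- from typing import Any, Dict, List, Optional, Set, Tuple
--
-- def _classify_java_symbol(node_type: str, annotations: List[str]) -> str:
--     """Classify a Java symbol for retrieval purposes."""
--     annotation_set = {a.split("(")[0] for a in annotations}
--
--     # Spring stereotypes
--     if annotation_set & {"@Controller", "@RestController"}:
--         return "controller"
--     if annotation_set & {"@Service"}:
--         return "service"
--     if annotation_set & {"@Repository"}:
--         return "repository"
--     if annotation_set & {"@Configuration"}: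
--         return "configuration"
--     if annotation_set & {"@Entity", "@MappedSuperclass"}:
--         return "entity"
--     if annotation_set & {"@Component"}:
--         return "component"
--
--     # Test classes
--     if annotation_set & {"@SpringBootTest", "@WebMvcTest", "@DataJpaTest", "@Test"}:
--         return "test"
--
--     # Fallback to node type
--     type_map = {
--         "class_declaration": "class",
--         "interface_declaration": "interface",
--         "enum_declaration": "enum",
--         "record_declaration": "record",
--         "annotation_type_declaration": "annotation",
--         "method_declaration": "method",
--         "constructor_declaration": "constructor",
--     }
--     return type_map.get(node_type, "unknown")
-- ===== SOURCE B (Python) =====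
-- from typing import List
--
-- _PRIORITY = {
--     "@Controller": 0, "@RestController": 0,
--     "@Service": 1,
--     "@Repository": 2,
--     "@Configuration": 3,
--     "@Entity": 4, "@MappedSuperclass": 4,
--     "@Component": 5,
--     "@SpringBootTest": 6, "@WebMvcTest": 6, "@DataJpaTest": 6, "@Test": 6,
-- }
--
-- _LABELS = ["controller", "service", "repository", "configuration",
--            "entity", "component", "test"]
--
-- _TYPE_MAP = {
--     "class_declaration": "class",
--     "interface_declaration": "interface",
--     "enum_declaration": "enum",
--     "record_declaration": "record",
--     "annotation_type_declaration": "annotation",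
--     "method_declaration": "method",
--     "constructor_declaration": "constructor",
-- }
--
--
-- def _classify_java_symbol(node_type: str, annotations: List[str]) -> str:
--     """Classify a Java symbol: one pass over annotations keeping the best
--     (lowest) priority seen, then index a label table."""
--     best = None
--     for a in annotations:
--         p = _PRIORITY.get(a.split("(")[0])
--         if p is not None and (best is None or p < best):
--             best = p
--     if best is not None:
--         return _LABELS[best]
--     return _TYPE_MAP.get(node_type, "unknown")
-- ===== Notes on version B (the rewrite author's own statement) =====
-- stated objective: alternative
-- what changed: A builds a set of stripped annotation names and runs seven ordered intersection checks; B makes one pass over the annotations keeping the minimum index from a name-to-priority table and indexes a label list, falling back to the same type map.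
import Mathlib
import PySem

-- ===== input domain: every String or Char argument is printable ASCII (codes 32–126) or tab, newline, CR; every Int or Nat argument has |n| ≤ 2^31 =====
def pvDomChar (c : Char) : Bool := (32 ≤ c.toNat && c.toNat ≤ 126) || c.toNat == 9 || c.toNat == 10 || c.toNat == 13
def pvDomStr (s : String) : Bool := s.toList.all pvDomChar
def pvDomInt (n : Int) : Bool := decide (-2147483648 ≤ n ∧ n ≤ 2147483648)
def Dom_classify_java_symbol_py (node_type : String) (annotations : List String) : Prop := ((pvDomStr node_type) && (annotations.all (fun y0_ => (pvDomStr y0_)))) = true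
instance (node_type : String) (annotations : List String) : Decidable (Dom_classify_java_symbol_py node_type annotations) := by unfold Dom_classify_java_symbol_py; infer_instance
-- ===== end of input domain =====

-- B replaces A's set-build plus seven ordered intersection checks by a single pass over the
-- annotations keeping the minimum priority index, then one label-table lookup (objective: alternative).

-- ===== PORT A =====
-- a.split("(")[0]: split with the non-empty separator "(" always yields a non-empty list, so [0] = headD "" is exact
def pvStrip (a : String) : String := ((PySem.Str.split? a "(").getD []).headD ""

def pvTypeMap : PySem.Dict String String :=
  PySem.Dict.ofList [("class_declaration", "class"), ("interface_declaration", "interface"),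
    ("enum_declaration", "enum"), ("record_declaration", "record"),
    ("annotation_type_declaration", "annotation"), ("method_declaration", "method"),
    ("constructor_declaration", "constructor")]

def classify_java_symbol_py (node_type : String) (annotations : List String) : String :=
  let annotation_set : PySem.Set String := PySem.Set.ofList (annotations.map pvStrip)
  -- 'annotation_set & {…}' is truthy exactly when some listed name is a member
  if PySem.Set.contains annotation_set "@Controller" || PySem.Set.contains annotation_set "@RestController" then "controller"
  else if PySem.Set.contains annotation_set "@Service" then "service"
  else if PySem.Set.contains annotation_set "@Repository" then "repository"
  else if PySem.Set.contains annotation_set "@Configuration" then "configuration"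
  else if PySem.Set.contains annotation_set "@Entity" || PySem.Set.contains annotation_set "@MappedSuperclass" then "entity"
  else if PySem.Set.contains annotation_set "@Component" then "component"
  else if PySem.Set.contains annotation_set "@SpringBootTest" || PySem.Set.contains annotation_set "@WebMvcTest" ||
          PySem.Set.contains annotation_set "@DataJpaTest" || PySem.Set.contains annotation_set "@Test" then "test"
  else PySem.Dict.getD pvTypeMap node_type "unknown"

-- ===== PORT B =====
def pvPriority : PySem.Dict String Nat :=
  PySem.Dict.ofList [("@Controller", 0), ("@RestController", 0), ("@Service", 1),
    ("@Repository", 2), ("@Configuration", 3), ("@Entity", 4), ("@MappedSuperclass", 4),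
    ("@Component", 5), ("@SpringBootTest", 6), ("@WebMvcTest", 6), ("@DataJpaTest", 6), ("@Test", 6)]

def pvLabels : List String :=
  ["controller", "service", "repository", "configuration", "entity", "component", "test"]

def pvStep (best : Option Nat) (a : String) : Option Nat :=
  match PySem.Dict.get? pvPriority (pvStrip a) with
  | some p => match best with
              | none => some p
              | some b => if p < b then some p else best
  | none => best

def classify_java_symbol_py_alt (node_type : String) (annotations : List String) : String :=
  match annotations.foldl pvStep none with
  -- _LABELS[best]: best is the minimum stored priority, always < 7 = len(_LABELS), so in range
  | some b => (PySem.List.pyGet? pvLabels (b : Int)).getD ""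
  | none => PySem.Dict.getD pvTypeMap node_type "unknown"

-- ===== PRECONDITION & SPEC =====
def Spec_classify_java_symbol_py (node_type : String) (annotations : List String) (out : String) : Prop := out = classify_java_symbol_py_alt node_type annotations
instance (node_type : String) (annotations : List String) (out : String) : Decidable (Spec_classify_java_symbol_py node_type annotations out) := by unfold Spec_classify_java_symbol_py; infer_instance

-- ===== CLAIM (what is proved, stated in full; the proofs are below) =====
def Claim_equal_classify_java_symbol_py : Prop := ∀ (node_type : String) (annotations : List String), Dom_classify_java_symbol_py node_type annotations → Spec_classify_java_symbol_py node_type annotations (classify_java_symbol_py node_type annotations)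

-- ===== LEMMAS AND PROOFS =====

-- the priority (if any) of one raw annotation
def pvG (a : String) : Option Nat := PySem.Dict.get? pvPriority (pvStrip a)

theorem pvStep_def (best : Option Nat) (a : String) :
    pvStep best a = match pvG a with
      | some p => match best with
                  | none => some p
                  | some b => if p < b then some p else best
      | none => best := rfl

theorem prio_inv (s : String) (j : Nat) (h : PySem.Dict.get? pvPriority s = some j) :
    s = "@Controller" ∧ j = 0 ∨ s = "@RestController" ∧ j = 0 ∨ s = "@Service" ∧ j = 1 ∨
    s = "@Repository" ∧ j = 2 ∨ s = "@Configuration" ∧ j = 3 ∨ s = "@Entity" ∧ j = 4 ∨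
    s = "@MappedSuperclass" ∧ j = 4 ∨ s = "@Component" ∧ j = 5 ∨ s = "@SpringBootTest" ∧ j = 6 ∨
    s = "@WebMvcTest" ∧ j = 6 ∨ s = "@DataJpaTest" ∧ j = 6 ∨ s = "@Test" ∧ j = 6 := by
  unfold PySem.Dict.get? at h
  cases hf : List.find? (fun p => p.1 == s) pvPriority.items with
  | none => rw [hf] at h; simp at h
  | some p =>
    rw [hf] at h
    have hpj : p.2 = j := by simpa using h
    have hp1 := List.find?_some hf
    have hmem : p ∈ pvPriority.items := List.mem_of_find?_eq_some hf
    have hit : pvPriority.items = [("@Controller", 0), ("@RestController", 0), ("@Service", 1),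
      ("@Repository", 2), ("@Configuration", 3), ("@Entity", 4), ("@MappedSuperclass", 4),
      ("@Component", 5), ("@SpringBootTest", 6), ("@WebMvcTest", 6), ("@DataJpaTest", 6), ("@Test", 6)] := rfl
    rw [hit] at hmem
    simp only [List.mem_cons, List.not_mem_nil, or_false] at hmem
    rcases hmem with rfl | rfl | rfl | rfl | rfl | rfl | rfl | rfl | rfl | rfl | rfl | rfl <;>
      (simp at hp1 hpj; subst hp1; subst hpj; simp)

theorem fold_min (l : List String) (acc : Option Nat) (j : Nat)
    (h : l.foldl pvStep acc = some j) :
    (acc = some j ∨ ∃ a ∈ l, pvG a = some j) ∧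
    (∀ k, acc = some k → j ≤ k) ∧
    (∀ a ∈ l, ∀ k, pvG a = some k → j ≤ k) := by
  induction l generalizing acc with
  | nil =>
    simp only [List.foldl_nil] at h
    refine ⟨Or.inl h, fun k hk => ?_, by simp⟩
    rw [h] at hk; cases hk; exact le_refl _
  | cons a l ih =>
    simp only [List.foldl_cons] at h
    obtain ⟨h1, h2, h3⟩ := ih (pvStep acc a) h
    refine ⟨?_, ?_, ?_⟩
    · cases hg : pvG a with
      | none =>
        have hstep : pvStep acc a = acc := by simp [pvStep_def, hg]
        rw [hstep] at h1
        rcases h1 with h1 | ⟨b, hb, hgb⟩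
        · exact Or.inl h1
        · exact Or.inr ⟨b, List.mem_cons_of_mem a hb, hgb⟩
      | some p =>
        cases acc with
        | none =>
          have hstep : pvStep none a = some p := by simp [pvStep_def, hg]
          rw [hstep] at h1
          rcases h1 with h1 | ⟨b, hb, hgb⟩
          · exact Or.inr ⟨a, List.mem_cons_self, by rw [hg]; exact h1⟩
          · exact Or.inr ⟨b, List.mem_cons_of_mem a hb, hgb⟩
        | some b0 =>
          by_cases hpb : p < b0
          · have hstep : pvStep (some b0) a = some p := by simp [pvStep_def, hg, hpb]
            rw [hstep] at h1
            rcases h1 with h1 | ⟨b, hb, hgb⟩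
            · exact Or.inr ⟨a, List.mem_cons_self, by rw [hg]; exact h1⟩
            · exact Or.inr ⟨b, List.mem_cons_of_mem a hb, hgb⟩
          · have hstep : pvStep (some b0) a = some b0 := by simp [pvStep_def, hg, hpb]
            rw [hstep] at h1
            rcases h1 with h1 | ⟨b, hb, hgb⟩
            · exact Or.inl h1
            · exact Or.inr ⟨b, List.mem_cons_of_mem a hb, hgb⟩
    · intro k hk
      cases hg : pvG a with
      | none => exact h2 k (by simp [pvStep_def, hg, hk])
      | some p =>
        by_cases hpk : p < k
        · have : j ≤ p := h2 p (by simp [pvStep_def, hg, hk, hpk])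
          omega
        · exact h2 k (by simp [pvStep_def, hg, hk, hpk])
    · intro b hb k hk
      rcases List.mem_cons.1 hb with hb | hb
      · subst hb
        cases acc with
        | none => exact h2 k (by simp [pvStep_def, hk])
        | some c =>
          by_cases hkc : k < c
          · exact h2 k (by simp [pvStep_def, hk, hkc])
          · have : j ≤ c := h2 c (by simp [pvStep_def, hk, hkc])
            omega
      · exact h3 b hb k hk

theorem fold_none (l : List String) (acc : Option Nat)
    (h : l.foldl pvStep acc = none) :
    acc = none ∧ ∀ a ∈ l, pvG a = none := by
  induction l generalizing acc with
  | nil => simp only [List.foldl_nil] at h; exact ⟨h, by simp⟩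
  | cons a l ih =>
    simp only [List.foldl_cons] at h
    obtain ⟨hstepnone, hrest⟩ := ih (pvStep acc a) h
    have hga : pvG a = none ∧ acc = none := by
      cases hg : pvG a with
      | none =>
        have hstep : pvStep acc a = acc := by simp [pvStep_def, hg]
        rw [hstep] at hstepnone
        exact ⟨rfl, hstepnone⟩
      | some p =>
        exfalso
        cases acc with
        | none =>
          have hstep : pvStep none a = some p := by simp [pvStep_def, hg]
          rw [hstep] at hstepnone; cases hstepnone
        | some b =>
          by_cases h' : p < b
          · have hstep : pvStep (some b) a = some p := by simp [pvStep_def, hg, h']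
            rw [hstep] at hstepnone; cases hstepnone
          · have hstep : pvStep (some b) a = some b := by simp [pvStep_def, hg, h']
            rw [hstep] at hstepnone; cases hstepnone
    refine ⟨hga.2, fun b hb => ?_⟩
    rcases List.mem_cons.1 hb with hb | hb
    · subst hb; exact hga.1
    · exact hrest b hb

-- ===== VERDICT (by name: the statement is the Claim_ definition above) =====
theorem classify_java_symbol_py_spec : Claim_equal_classify_java_symbol_py := by
  intro nt anns _
  unfold Spec_classify_java_symbol_py
  cases hbest : anns.foldl pvStep none with
  | none =>
    obtain ⟨-, hall⟩ := fold_none anns none hbest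
    have hnone : ∀ x k, PySem.Dict.get? pvPriority x = some k → ¬ ∃ a ∈ anns, pvStrip a = x := by
      rintro x k hx ⟨a, ha, hax⟩
      have hn := hall a ha
      unfold pvG at hn
      rw [hax] at hn
      simp [hn] at hx
    simp [classify_java_symbol_py, classify_java_symbol_py_alt, hbest,
      hnone "@Controller" 0 (by decide), hnone "@RestController" 0 (by decide),
      hnone "@Service" 1 (by decide), hnone "@Repository" 2 (by decide),
      hnone "@Configuration" 3 (by decide), hnone "@Entity" 4 (by decide),
      hnone "@MappedSuperclass" 4 (by decide), hnone "@Component" 5 (by decide),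
      hnone "@SpringBootTest" 6 (by decide), hnone "@WebMvcTest" 6 (by decide),
      hnone "@DataJpaTest" 6 (by decide), hnone "@Test" 6 (by decide)]
  | some j =>
    obtain ⟨h1, -, hmin⟩ := fold_min anns none j hbest
    rcases h1 with h1 | ⟨a, ha, hga⟩
    · exact absurd h1 (by simp)
    · have hfalse : ∀ x k, PySem.Dict.get? pvPriority x = some k → k < j →
          ¬ ∃ a' ∈ anns, pvStrip a' = x := by
        rintro x k hx hkj ⟨a', ha', hax'⟩
        have := hmin a' ha' k (by unfold pvG; rw [hax']; exact hx)
        omega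
      have htrue : ∀ x, pvStrip a = x → ∃ a' ∈ anns, pvStrip a' = x :=
        fun x hx => ⟨a, ha, hx⟩
      unfold pvG at hga
      rcases prio_inv (pvStrip a) j hga with
        ⟨hs, hj⟩ | ⟨hs, hj⟩ | ⟨hs, hj⟩ | ⟨hs, hj⟩ | ⟨hs, hj⟩ | ⟨hs, hj⟩ |
        ⟨hs, hj⟩ | ⟨hs, hj⟩ | ⟨hs, hj⟩ | ⟨hs, hj⟩ | ⟨hs, hj⟩ | ⟨hs, hj⟩
      · subst hj
        simp [classify_java_symbol_py, classify_java_symbol_py_alt, hbest, pvLabels, htrue _ hs]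
      · subst hj
        simp [classify_java_symbol_py, classify_java_symbol_py_alt, hbest, pvLabels, htrue _ hs]
      · subst hj
        simp [classify_java_symbol_py, classify_java_symbol_py_alt, hbest, pvLabels, htrue _ hs,
          hfalse "@Controller" 0 (by decide) (by decide), hfalse "@RestController" 0 (by decide) (by decide)]
      · subst hj
        simp [classify_java_symbol_py, classify_java_symbol_py_alt, hbest, pvLabels, htrue _ hs,
          hfalse "@Controller" 0 (by decide) (by decide), hfalse "@RestController" 0 (by decide) (by decide),
          hfalse "@Service" 1 (by decide) (by decide)]
      · subst hj
        simp [classify_java_symbol_py, classify_java_symbol_py_alt, hbest, pvLabels, htrue _ hs,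
          hfalse "@Controller" 0 (by decide) (by decide), hfalse "@RestController" 0 (by decide) (by decide),
          hfalse "@Service" 1 (by decide) (by decide), hfalse "@Repository" 2 (by decide) (by decide)]
      · subst hj
        simp [classify_java_symbol_py, classify_java_symbol_py_alt, hbest, pvLabels, htrue _ hs,
          hfalse "@Controller" 0 (by decide) (by decide), hfalse "@RestController" 0 (by decide) (by decide),
          hfalse "@Service" 1 (by decide) (by decide), hfalse "@Repository" 2 (by decide) (by decide),
          hfalse "@Configuration" 3 (by decide) (by decide)]
      · subst hj
        simp [classify_java_symbol_py, classify_java_symbol_py_alt, hbest, pvLabels, htrue _ hs,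
          hfalse "@Controller" 0 (by decide) (by decide), hfalse "@RestController" 0 (by decide) (by decide),
          hfalse "@Service" 1 (by decide) (by decide), hfalse "@Repository" 2 (by decide) (by decide),
          hfalse "@Configuration" 3 (by decide) (by decide)]
      · subst hj
        simp [classify_java_symbol_py, classify_java_symbol_py_alt, hbest, pvLabels, htrue _ hs,
          hfalse "@Controller" 0 (by decide) (by decide), hfalse "@RestController" 0 (by decide) (by decide),
          hfalse "@Service" 1 (by decide) (by decide), hfalse "@Repository" 2 (by decide) (by decide),
          hfalse "@Configuration" 3 (by decide) (by decide), hfalse "@Entity" 4 (by decide) (by decide),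
          hfalse "@MappedSuperclass" 4 (by decide) (by decide)]
      · subst hj
        simp [classify_java_symbol_py, classify_java_symbol_py_alt, hbest, pvLabels, htrue _ hs,
          hfalse "@Controller" 0 (by decide) (by decide), hfalse "@RestController" 0 (by decide) (by decide),
          hfalse "@Service" 1 (by decide) (by decide), hfalse "@Repository" 2 (by decide) (by decide),
          hfalse "@Configuration" 3 (by decide) (by decide), hfalse "@Entity" 4 (by decide) (by decide),
          hfalse "@MappedSuperclass" 4 (by decide) (by decide), hfalse "@Component" 5 (by decide) (by decide)]
      · subst hj
        simp [classify_java_symbol_py, classify_java_symbol_py_alt, hbest, pvLabels, htrue _ hs,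
          hfalse "@Controller" 0 (by decide) (by decide), hfalse "@RestController" 0 (by decide) (by decide),
          hfalse "@Service" 1 (by decide) (by decide), hfalse "@Repository" 2 (by decide) (by decide),
          hfalse "@Configuration" 3 (by decide) (by decide), hfalse "@Entity" 4 (by decide) (by decide),
          hfalse "@MappedSuperclass" 4 (by decide) (by decide), hfalse "@Component" 5 (by decide) (by decide)]
      · subst hj
        simp [classify_java_symbol_py, classify_java_symbol_py_alt, hbest, pvLabels, htrue _ hs,
          hfalse "@Controller" 0 (by decide) (by decide), hfalse "@RestController" 0 (by decide) (by decide),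
          hfalse "@Service" 1 (by decide) (by decide), hfalse "@Repository" 2 (by decide) (by decide),
          hfalse "@Configuration" 3 (by decide) (by decide), hfalse "@Entity" 4 (by decide) (by decide),
          hfalse "@MappedSuperclass" 4 (by decide) (by decide), hfalse "@Component" 5 (by decide) (by decide)]
      · subst hj
        simp [classify_java_symbol_py, classify_java_symbol_py_alt, hbest, pvLabels, htrue _ hs,
          hfalse "@Controller" 0 (by decide) (by decide), hfalse "@RestController" 0 (by decide) (by decide),
          hfalse "@Service" 1 (by decide) (by decide), hfalse "@Repository" 2 (by decide) (by decide),
          hfalse "@Configuration" 3 (by decide) (by decide), hfalse "@Entity" 4 (by decide) (by decide),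
          hfalse "@MappedSuperclass" 4 (by decide) (by decide), hfalse "@Component" 5 (by decide) (by decide)]
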